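-- pv_equiv track=rewrite | github.com/kerfriden/SurrOptim | src/sparse_grid.py | generate_list_orders
-- ===== SOURCE A (Python) =====
-- def compute_n_from_level(l: int) -> int:
--     """
--     Map refinement level to number of quadrature nodes.
--
--     Args:
--         l: Refinement level (0, 1, 2, ...)
--
--     Returns:
--         Number of nodes
--
--     Raises:
--         ValueError: If level is invalid
--     """
--     if l < 0:
--         raise ValueError(f"Refinement level must be non-negative, got {l}")
--
--     if l == 0:
--         return 0
--     elif l == 1:
--         return 1
--     elif l == 2:
--         return 3
--     else:
--         n = 3
--         for _ in range(l - 2):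
--             n = n + (n - 1)
--         return n
--
-- def generate_integers(i: int, j: int) -> list:
--     """Generate list of integers from i to j-1."""
--     if i >= j:
--         raise ValueError(f"Start ({i}) must be less than end ({j})")
--     return list(range(i, j))
--
-- def generate_list_orders(N: int) -> list:
--     """Generate list of order ranges for each refinement level."""
--     if N <= 0:
--         raise ValueError(f"N must be positive, got {N}")
--
--     list_orders = []
--     for i in range(N):
--         n1 = compute_n_from_level(i)
--         n2 = compute_n_from_level(i + 1)
--         list_orders.append(generate_integers(n1, n2))
--     return list_orders
-- ===== SOURCE B (Python) =====
-- def generate_list_orders(N: int) -> list: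
--     """Generate list of order ranges for each refinement level."""
--     if N <= 0:
--         raise ValueError(f"N must be positive, got {N}")
--
--     # boundary table: b[k] = number of nodes at level k
--     b = [0, 1, 3][:N + 1]
--     while len(b) < N + 1:
--         b.append(2 * b[-1] - 1)
--     return [list(range(lo, hi)) for lo, hi in zip(b, b[1:])]
-- ===== Notes on version B (the rewrite author's own statement) =====
-- stated objective: simpler
-- what changed: Instead of recomputing compute_n_from_level twice per level (each call re-running its inner doubling loop), B builds the full boundary table once with the seeds 0,1,3 and the 2*b[-1]-1 recurrence, then emits the result by pairing consecutive boundaries with zip.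
import Mathlib
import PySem

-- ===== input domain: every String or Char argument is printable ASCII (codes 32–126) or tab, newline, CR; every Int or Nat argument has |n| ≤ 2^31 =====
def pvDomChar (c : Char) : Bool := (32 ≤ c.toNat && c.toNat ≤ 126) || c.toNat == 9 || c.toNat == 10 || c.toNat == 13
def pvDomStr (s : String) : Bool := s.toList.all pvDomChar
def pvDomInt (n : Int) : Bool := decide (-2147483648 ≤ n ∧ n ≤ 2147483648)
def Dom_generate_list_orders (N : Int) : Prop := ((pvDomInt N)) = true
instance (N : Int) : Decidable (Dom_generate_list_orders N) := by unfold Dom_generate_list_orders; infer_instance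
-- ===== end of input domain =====

-- B replaces A's per-level recomputation of compute_n_from_level by one cumulative
-- boundary table followed by pairing consecutive boundaries (objective: simpler).
-- Equivalence is about the RETURN value; both raise ValueError for N <= 0 (outside Pre_).

-- ===== PORT A =====
def compute_n_from_level (l : Int) : Int :=
  if l < 0 then 0          -- raise ValueError (unreachable under Pre_)
  else if l = 0 then 0
  else if l = 1 then 1
  else if l = 2 then 3
  else (List.range (l - 2).toNat).foldl (fun n _ => n + (n - 1)) 3  -- for _ in range(l-2): n = n + (n-1)

def generate_integers (i j : Int) : List Int :=
  if i ≥ j then []         -- raise ValueError (never reached from generate_list_orders under Pre_)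
  else PySem.List.pyRange i j 1

def generate_list_orders (N : Int) : List (List Int) :=
  if N ≤ 0 then []         -- raise ValueError: excluded by Pre_
  else (PySem.List.pyRange 0 N 1).foldl
    (fun acc i => acc ++ [generate_integers (compute_n_from_level i) (compute_n_from_level (i + 1))]) []

-- ===== PORT B =====
-- while len(b) < N+1: b.append(2*b[-1]-1)   (fuel = number of missing entries)
def pvExtend : Nat → List Int → List Int
  | 0, b => b
  | k + 1, b => pvExtend k (b ++ [2 * b.getLastD 0 - 1])

-- b = [0,1,3][:N+1] extended while len(b) < N+1
def pvBoundaries (n1 : Nat) : List Int :=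
  pvExtend (n1 - (([0, 1, 3] : List Int).take n1).length) (([0, 1, 3] : List Int).take n1)

def generate_list_orders_alt (N : Int) : List (List Int) :=
  if N ≤ 0 then []         -- raise ValueError: excluded by Pre_
  else
    let b := pvBoundaries (N + 1).toNat
    (b.zip b.tail).map (fun p => PySem.List.pyRange p.1 p.2 1)

-- ===== PRECONDITION & SPEC =====
-- A raises ValueError exactly for N <= 0; Pre_ admits every input on which A returns.
def Pre_generate_list_orders (N : Int) : Prop := 0 < N
instance (N : Int) : Decidable (Pre_generate_list_orders N) := by unfold Pre_generate_list_orders; infer_instance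
def pvWitness_generate_list_orders : Int := (3)

def Spec_generate_list_orders (N : Int) (out : List (List Int)) : Prop := out = generate_list_orders_alt N
instance (N : Int) (out : List (List Int)) : Decidable (Spec_generate_list_orders N out) := by unfold Spec_generate_list_orders; infer_instance

-- ===== CLAIM (what is proved, stated in full; the proofs are below) =====
def Claim_equal_generate_list_orders : Prop := ∀ (N : Int), Dom_generate_list_orders N → Pre_generate_list_orders N → Spec_generate_list_orders N (generate_list_orders N)

-- ===== LEMMAS AND PROOFS =====

-- canonical boundary sequence: 0, 1, 3, then b_{k+1} = 2 b_k - 1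
def pvC : Nat → Int
  | 0 => 0
  | 1 => 1
  | 2 => 3
  | (k + 3) => 2 * pvC (k + 2) - 1

lemma pvC_ge (k : Nat) : 3 ≤ pvC (k + 2) := by
  induction k with
  | zero => decide
  | succ k ih => show 2 * pvC (k + 2) - 1 ≥ 3; omega

lemma pvC_lt (k : Nat) : pvC k < pvC (k + 1) := by
  match k with
  | 0 => decide
  | 1 => decide
  | (k + 2) => have := pvC_ge k; show pvC (k+2) < 2 * pvC (k+2) - 1; omega

lemma iter_eq (j : Nat) : (List.range j).foldl (fun n _ => n + (n - 1)) 3 = pvC (j + 2) := by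
  induction j with
  | zero => decide
  | succ j ih =>
      rw [List.range_succ, List.foldl_append, ih]
      show pvC (j + 2) + (pvC (j + 2) - 1) = 2 * pvC (j + 2) - 1
      ring

lemma f_eq (k : Nat) : compute_n_from_level (k : Int) = pvC k := by
  match k with
  | 0 => decide
  | 1 => decide
  | 2 => decide
  | (k + 3) =>
      unfold compute_n_from_level
      have h0 : ¬ ((k + 3 : Nat) : Int) < 0 := by omega
      have h1 : ¬ ((k + 3 : Nat) : Int) = 0 := by omega
      have h2 : ¬ ((k + 3 : Nat) : Int) = 1 := by omega
      have h3 : ¬ ((k + 3 : Nat) : Int) = 2 := by omega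
      rw [if_neg h0, if_neg h1, if_neg h2, if_neg h3]
      have h4 : (((k + 3 : Nat) : Int) - 2).toNat = k + 1 := by omega
      rw [h4, iter_eq]

lemma gi_eq (k : Nat) : generate_integers (pvC k) (pvC (k + 1)) = PySem.List.pyRange (pvC k) (pvC (k + 1)) 1 := by
  unfold generate_integers
  rw [if_neg (by exact not_le.mpr (pvC_lt k))]

lemma extend_eq (k : Nat) : ∀ (L : Nat), 3 ≤ L →
    pvExtend k ((List.range L).map pvC) = (List.range (L + k)).map pvC := by
  induction k with
  | zero => intro L _; rfl
  | succ k ih =>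
      intro L hL
      obtain ⟨m, rfl⟩ : ∃ m, L = m + 3 := ⟨L - 3, by omega⟩
      show pvExtend k (((List.range (m+3)).map pvC) ++ [2 * ((List.range (m+3)).map pvC).getLastD 0 - 1]) = _
      have hlast : ((List.range (m + 3)).map pvC).getLastD 0 = pvC (m + 2) := by
        rw [List.range_succ (n := m + 2), List.map_append]
        simp
      rw [hlast]
      have hstep : ((List.range (m+3)).map pvC) ++ [2 * pvC (m + 2) - 1] = (List.range (m + 3 + 1)).map pvC := by
        rw [List.range_succ (n := m + 3), List.map_append]
        rfl
      rw [hstep, show m + 3 + 1 = m + 4 from rfl, ih (m + 4) (by omega),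
          show m + 4 + k = m + 3 + (k + 1) from by omega]

lemma pairs_map_range (n : Nat) : ∀ (f : Nat → Int),
    ((List.range (n + 1)).map f).zip (((List.range (n + 1)).map f).tail)
      = (List.range n).map (fun k => (f k, f (k + 1))) := by
  induction n with
  | zero => intro f; rfl
  | succ n ih =>
      intro f
      have hx : (List.range (n + 1 + 1)).map f = f 0 :: (List.range (n + 1)).map (fun k => f (k + 1)) := by
        rw [List.range_succ_eq_map]
        simp [Function.comp]
      have hy : (List.range (n + 1)).map (fun k => f (k + 1)) = f 1 :: (List.range n).map (fun k => f (k + 2)) := by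
        rw [List.range_succ_eq_map]
        simp [Function.comp]
      have hz := ih (fun k => f (k + 1))
      rw [hy] at hz
      simp only [List.tail_cons] at hz
      rw [hx, List.tail_cons, hy, List.zip_cons_cons, hz, List.range_succ_eq_map]
      simp [Function.comp]

-- A's loop as a map over levels
lemma portA_eq (M : Nat) (hM : 1 ≤ M) :
    generate_list_orders (M : Int)
      = (List.range M).map (fun k => PySem.List.pyRange (pvC k) (pvC (k + 1)) 1) := by
  unfold generate_list_orders
  rw [if_neg (by omega)]
  rw [PySem.List.foldl_append_singleton_eq_map]
  rw [PySem.List.pyRange_one]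
  have h : ((M : Int) - 0).toNat = M := by omega
  rw [h, List.map_map]
  apply List.map_congr_left
  intro k _
  simp only [Function.comp]
  have hk : (0 : Int) + (k : Int) = (k : Int) := by ring
  rw [hk]
  have hk1 : ((k : Int) + 1) = ((k + 1 : Nat) : Int) := by omega
  rw [hk1, f_eq, f_eq, gi_eq]

-- B's table equals the canonical boundary list
lemma portB_eq (M : Nat) (hM : 1 ≤ M) :
    generate_list_orders_alt (M : Int)
      = (List.range M).map (fun k => PySem.List.pyRange (pvC k) (pvC (k + 1)) 1) := by
  have hT : ((M : Int) + 1).toNat = M + 1 := by omega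
  have hb : pvBoundaries (M + 1) = (List.range (M + 1)).map pvC := by
    by_cases h2 : M = 1
    · subst h2; decide
    · unfold pvBoundaries
      have htake : ([0, 1, 3] : List Int).take (M + 1) = [0, 1, 3] :=
        List.take_of_length_le (by simp; omega)
      rw [htake, show ([0, 1, 3] : List Int) = (List.range 3).map pvC from by decide]
      simp only [List.length_map, List.length_range]
      rw [extend_eq (M + 1 - 3) 3 (by omega), show 3 + (M + 1 - 3) = M + 1 from by omega]
  unfold generate_list_orders_alt
  rw [if_neg (by omega)]
  show ((pvBoundaries ((M : Int) + 1).toNat).zip (pvBoundaries ((M : Int) + 1).toNat).tail).map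
    (fun p => PySem.List.pyRange p.1 p.2 1) = _
  rw [hT, hb, pairs_map_range M pvC, List.map_map]
  rfl

-- ===== VERDICT (by name: the statement is the Claim_ definition above) =====
theorem generate_list_orders_spec : Claim_equal_generate_list_orders := by
  intro N _ hPre
  unfold Pre_generate_list_orders at hPre
  unfold Spec_generate_list_orders
  have hN : N = (N.toNat : Int) := by omega
  have hM : 1 ≤ N.toNat := by omega
  rw [hN, portA_eq N.toNat hM, portB_eq N.toNat hM]
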